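-- pv_equiv track=rewrite | github.com/caiselvas/named-entity-recognition | new_gridsearch.py | generate_feature_configs
-- ===== SOURCE A (Python) =====
-- from itertools import product
--
-- def generate_feature_configs(feature_groups):
--     feature_configs = []
--     for config in product(*[[True, False] for _ in range(len(feature_groups))]):
--         feature_config = {}
--         for i, group in enumerate(feature_groups):
--             for feature in group:
--                 feature_config[feature] = config[i]
--         feature_configs.append(feature_config)
--     return feature_configs
-- ===== SOURCE B (Python) =====
-- def generate_feature_configs(feature_groups):
--     # Incremental doubling: one pass over the groups, no itertools.product.
--     result = [{}]
--     for group in feature_groups: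
--         new = []
--         for cfg in result:
--             on = cfg.copy()
--             off = cfg.copy()
--             for feature in group:
--                 on[feature] = True
--                 off[feature] = False
--             new.append(on)
--             new.append(off)
--         result = new
--     return result
-- ===== Notes on version B (the rewrite author's own statement) =====
-- stated objective: alternative
-- what changed: Replaces the itertools.product enumeration of all on/off tuples (rebuilding each dict from scratch) with a single pass over the groups that incrementally doubles the list of partial configs, extending copies of each with the group set to True and to False.
import Mathlib
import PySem

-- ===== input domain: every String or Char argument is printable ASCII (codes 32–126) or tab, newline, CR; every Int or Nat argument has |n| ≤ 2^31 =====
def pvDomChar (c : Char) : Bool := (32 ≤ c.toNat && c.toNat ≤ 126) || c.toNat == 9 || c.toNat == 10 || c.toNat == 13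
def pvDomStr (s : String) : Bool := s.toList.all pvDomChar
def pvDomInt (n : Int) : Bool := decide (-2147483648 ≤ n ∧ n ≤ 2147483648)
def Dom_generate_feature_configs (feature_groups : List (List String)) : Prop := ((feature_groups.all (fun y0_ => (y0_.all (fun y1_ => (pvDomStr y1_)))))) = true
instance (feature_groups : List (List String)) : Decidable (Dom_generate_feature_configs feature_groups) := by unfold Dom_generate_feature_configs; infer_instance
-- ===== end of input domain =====

-- B replaces the itertools.product enumeration with one incremental doubling pass over the groups (objective: alternative decomposition, same cost).

-- ===== PORT A =====
-- product(*[[True, False] for _ in range(n)]): first factor varies slowest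
def pvProdBool : Nat → List (List Bool)
  | 0 => [[]]
  | n + 1 => [true, false].flatMap (fun b => (pvProdBool n).map (fun t => b :: t))

-- inner two loops of A: for i, group in enumerate(feature_groups): for feature in group: fc[feature] = config[i]
-- config[i] is always in range here (i < len(config)); '.getD false' only totalizes the lookup
def pvFoldEnum (config : List Bool) (d : PySem.Dict String Bool) (l : List (Int × List String)) : PySem.Dict String Bool :=
  l.foldl (fun fc p =>
    p.2.foldl (fun fc feature => fc.insert feature ((PySem.List.pyGet? config p.1).getD false)) fc) d

def generate_feature_configs (feature_groups : List (List String)) : List (List (String × Bool)) :=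
  ((pvProdBool feature_groups.length).foldl
    (fun feature_configs config =>
      feature_configs ++ [(pvFoldEnum config PySem.Dict.empty (PySem.List.enumerate feature_groups)).items])
    [])

-- ===== PORT B =====
-- for feature in group: cfg[feature] = b
def pvSetAll (cfg : PySem.Dict String Bool) (group : List String) (b : Bool) : PySem.Dict String Bool :=
  group.foldl (fun d feature => d.insert feature b) cfg

def generate_feature_configs_alt (feature_groups : List (List String)) : List (List (String × Bool)) :=
  (feature_groups.foldl
    (fun result group => result.flatMap (fun cfg => [pvSetAll cfg group true, pvSetAll cfg group false]))
    [PySem.Dict.empty]).map (·.items)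

-- ===== PRECONDITION & SPEC =====
def Spec_generate_feature_configs (feature_groups : List (List String)) (out : List (List (String × Bool))) : Prop := out = generate_feature_configs_alt feature_groups
instance (feature_groups : List (List String)) (out : List (List (String × Bool))) : Decidable (Spec_generate_feature_configs feature_groups out) := by unfold Spec_generate_feature_configs; infer_instance

-- ===== CLAIM (what is proved, stated in full; the proofs are below) =====
def Claim_equal_generate_feature_configs : Prop := ∀ (feature_groups : List (List String)), Dom_generate_feature_configs feature_groups → Spec_generate_feature_configs feature_groups (generate_feature_configs feature_groups)

-- ===== LEMMAS AND PROOFS =====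

-- common reference computation: zip config with the groups and apply each group with its bit
def pvApplyZip : PySem.Dict String Bool → List Bool → List (List String) → PySem.Dict String Bool
  | d, _, [] => d
  | d, [], _ :: _ => d
  | d, b :: bs, g :: gs => pvApplyZip (pvSetAll d g b) bs gs

theorem pvProdBool_length {n : Nat} {c : List Bool} (h : c ∈ pvProdBool n) : c.length = n := by
  induction n generalizing c with
  | zero => simp [pvProdBool] at h; simp [h]
  | succ n ih =>
    simp only [pvProdBool, List.mem_flatMap, List.mem_map] at h
    obtain ⟨b, -, c', hc', rfl⟩ := h
    simp [ih hc']

theorem pvFoldEnum_eq_applyZip (fgs : List (List String)) :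
    ∀ (pre config : List Bool) (d : PySem.Dict String Bool),
      config.length = fgs.length →
      pvFoldEnum (pre ++ config) d (PySem.List.enumerate fgs (pre.length : Int)) = pvApplyZip d config fgs := by
  induction fgs with
  | nil => intro pre config d h; simp at h; simp [h, pvFoldEnum, PySem.List.enumerate_nil, pvApplyZip]
  | cons g gs ih =>
    intro pre config d h
    cases config with
    | nil => simp at h
    | cons b bs =>
      simp at h
      rw [PySem.List.enumerate_cons]
      have hget : (PySem.List.pyGet? (pre ++ b :: bs) (pre.length : Int)).getD false = b := by
        rw [PySem.List.pyGet?_natCast]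
        simp
      have hstep : pvFoldEnum (pre ++ b :: bs) d (((pre.length : Int), g) :: PySem.List.enumerate gs ((pre.length : Int) + 1)) =
          pvFoldEnum (pre ++ b :: bs) (pvSetAll d g b) (PySem.List.enumerate gs ((pre.length : Int) + 1)) := by
        simp only [pvFoldEnum, List.foldl_cons, pvSetAll, hget]
      rw [hstep]
      have hpre : pre ++ b :: bs = (pre ++ [b]) ++ bs := by simp
      have hlen : ((pre ++ [b]).length : Int) = (pre.length : Int) + 1 := by simp
      rw [hpre, ← hlen, ih (pre ++ [b]) bs (pvSetAll d g b) h]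
      rfl

theorem pvFoldl_append_map {α β : Type} (f : α → β) :
    ∀ (l : List α) (acc : List β), l.foldl (fun a c => a ++ [f c]) acc = acc ++ l.map f := by
  intro l
  induction l with
  | nil => simp
  | cons x xs ih => intro acc; simp [ih]

theorem pvAltFold :
    ∀ (gs : List (List String)) (res : List (PySem.Dict String Bool)),
      gs.foldl (fun result group => result.flatMap (fun cfg => [pvSetAll cfg group true, pvSetAll cfg group false])) res
      = res.flatMap (fun d => (pvProdBool gs.length).map (fun c => pvApplyZip d c gs)) := by
  intro gs
  induction gs with
  | nil =>
    intro res
    simp [pvProdBool, pvApplyZip]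
  | cons g gs ih =>
    intro res
    rw [List.foldl_cons, ih]
    rw [List.flatMap_assoc]
    apply List.flatMap_congr  -- pointwise equality of the two flatMap bodies
    intro d _
    simp only [List.length_cons, pvProdBool, List.flatMap_cons, List.flatMap_nil,
      List.append_nil]
    rw [List.map_append, List.map_map, List.map_map]
    rfl

theorem generate_feature_configs_spec : Claim_equal_generate_feature_configs := by
  intro fgs _
  unfold Spec_generate_feature_configs generate_feature_configs generate_feature_configs_alt
  rw [pvAltFold, pvFoldl_append_map, List.nil_append, List.flatMap_cons, List.flatMap_nil,
    List.append_nil, List.map_map]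
  apply List.map_congr_left
  intro c hc
  have := pvFoldEnum_eq_applyZip fgs [] c PySem.Dict.empty (pvProdBool_length hc)
  simp only [List.nil_append, List.length_nil, Nat.cast_zero] at this
  simp [this]
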